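-- pv_equiv track=rewrite | github.com/obiwac/advent-of-code | 2024/21/main.py | get_seq
-- ===== SOURCE A (Python) =====
-- from functools import cache
--
-- def find(keypad, c):
-- 	ci, cj = -1, -1
--
-- 	for i in range(len(keypad)):
-- 		if c in keypad[i]:
-- 			ci, cj = i, keypad[i].index(c)
-- 			break
--
-- 	assert ci != -1 and cj != -1
-- 	return ci, cj
--
-- def get_seq(keypad, code):
-- 	ci, cj = find(keypad, "A")
-- 	seqs = [""]
--
-- 	for k, c in enumerate(code):
-- 		target_i, target_j = find(keypad, c)
--
-- 		@cache
-- 		def dfs(i, j, target_i, target_j, seq):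
-- 			if i == target_i and j == target_j:
-- 				return [seq + "A"]
--
-- 			seqs = []
--
-- 			if j > target_j:
-- 				seqs.extend(dfs(i, j - 1, target_i, target_j, seq + "<"))
-- 			elif j < target_j:
-- 				seqs.extend(dfs(i, j + 1, target_i, target_j, seq + ">"))
--
-- 			if i < target_i:
-- 				seqs.extend(dfs(i + 1, j, target_i, target_j, seq + "v"))
-- 			elif i > target_i:
-- 				seqs.extend(dfs(i - 1, j, target_i, target_j, seq + "^"))
--
-- 			return seqs
--
-- 		nseq = []
-- 		for seq in seqs:
-- 			if k > 0:
-- 				i, j = find(keypad, code[k - 1])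
-- 			else:
-- 				i, j = ci, cj
-- 			nseq.extend(dfs(i, j, target_i, target_j, seq))
-- 		seqs = nseq
--
-- 	return seqs
-- ===== SOURCE B (Python) =====
-- def find(keypad, c):
-- 	for i in range(len(keypad)):
-- 		if c in keypad[i]:
-- 			return i, keypad[i].index(c)
-- 	assert False
--
-- def get_seq(keypad, code):
-- 	def paths(i, j, ti, tj):
-- 		# all monotone shortest move-strings from (i, j) to (ti, tj), ending in "A",
-- 		# horizontal step alternatives listed before vertical ones (as in A)
-- 		if i == ti and j == tj:
-- 			return ["A"]
-- 		out = []
-- 		if j > tj: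
-- 			out += ["<" + p for p in paths(i, j - 1, ti, tj)]
-- 		elif j < tj:
-- 			out += [">" + p for p in paths(i, j + 1, ti, tj)]
-- 		if i < ti:
-- 			out += ["v" + p for p in paths(i + 1, j, ti, tj)]
-- 		elif i > ti:
-- 			out += ["^" + p for p in paths(i - 1, j, ti, tj)]
-- 		return out
--
-- 	pos = find(keypad, "A")
-- 	per_char = []
-- 	for c in code:
-- 		nxt = find(keypad, c)
-- 		per_char.append(paths(pos[0], pos[1], nxt[0], nxt[1]))
-- 		pos = nxt
--
-- 	res = [""]
-- 	for lst in per_char: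
-- 		res = [s + p for s in res for p in lst]
-- 	return res
-- ===== Notes on version B (the rewrite author's own statement) =====
-- stated objective: alternative
-- what changed: B separates path generation from prefix combination: one pure dfs per code character produces that character's list of move-strings (no accumulator threaded through), and the result is the ordered cartesian product of those per-character lists, instead of A's re-running an accumulator-carrying dfs for every already-built prefix.
import Mathlib
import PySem

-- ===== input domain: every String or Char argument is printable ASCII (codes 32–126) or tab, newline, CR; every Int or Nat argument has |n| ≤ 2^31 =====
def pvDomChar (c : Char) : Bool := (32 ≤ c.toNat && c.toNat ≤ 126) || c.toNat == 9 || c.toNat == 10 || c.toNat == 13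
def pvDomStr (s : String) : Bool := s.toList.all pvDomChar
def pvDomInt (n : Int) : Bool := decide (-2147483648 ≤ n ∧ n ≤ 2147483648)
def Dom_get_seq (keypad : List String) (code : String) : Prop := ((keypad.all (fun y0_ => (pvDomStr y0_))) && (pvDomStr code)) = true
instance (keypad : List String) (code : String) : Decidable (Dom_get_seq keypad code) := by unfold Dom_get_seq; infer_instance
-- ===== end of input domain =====

-- B separates path generation from prefix combination: one pure dfs per character, then an
-- ordered cartesian product, instead of A's accumulator-carrying dfs re-run per prefix
-- (objective: alternative decomposition, same output in the same order).

-- ===== PORT A =====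
-- `find(keypad, c)` for the single-character strings A passes it: `c in keypad[i]` is
-- character membership and `.index(c)` the first index; `none` models the assert failing.
def findAux (rows : List String) (c : Char) (i : Int) : Option (Int × Int) :=
  match rows with
  | [] => none
  | row :: rest =>
    if c ∈ row.toList then
      some (i, ((row.toList.idxOf c : Nat) : Int))
    else findAux rest c (i + 1)

def findP (keypad : List String) (c : Char) : Option (Int × Int) := findAux keypad c 0

-- fuel bound for dfs: one more than the taxicab distance still to cover; every
-- recursive call reduces the distance by one, so the 0-fuel branch is never reached.
def dfsFuel (ti tj i j : Int) : Nat := (ti - i).natAbs + (tj - j).natAbs + 1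

-- A's inner `dfs` (the @cache only memoizes; it never changes the value);
-- structural recursion on fuel is only a totality guard, the algorithm is A's.
def dfsAF (fuel : Nat) (ti tj i j : Int) (seq : List Char) : List (List Char) :=
  match fuel with
  | 0 => []
  | fuel + 1 =>
    if i = ti ∧ j = tj then [seq ++ ['A']]
    else
      (if tj < j then dfsAF fuel ti tj i (j - 1) (seq ++ ['<'])
       else if j < tj then dfsAF fuel ti tj i (j + 1) (seq ++ ['>'])
       else []) ++
      (if i < ti then dfsAF fuel ti tj (i + 1) j (seq ++ ['v'])
       else if ti < i then dfsAF fuel ti tj (i - 1) j (seq ++ ['^'])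
       else [])

def dfsA (ti tj i j : Int) (seq : List Char) : List (List Char) :=
  dfsAF (dfsFuel ti tj i j) ti tj i j seq

-- A's `for k, c in enumerate(code)` loop; the Option threads the AssertionError of `find`
-- (excluded by Pre_): `none` = the Python raises.
def loopA (keypad : List String) (cl : List Char) (ci cj : Int) :
    List (Int × Char) → List (List Char) → Option (List (List Char))
  | [], seqs => some seqs
  | (k, c) :: rest, seqs =>
    match findP keypad c with
    | none => none
    | some (ti, tj) =>
      match seqs.foldl (fun acc seq =>
          acc.bind (fun nseq =>
            (if k > 0 then (PySem.List.pyGet? cl (k - 1)).bind (fun c' => findP keypad c')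
             else some (ci, cj)).map
              (fun st => nseq ++ dfsA ti tj st.1 st.2 seq))) (some []) with
      | none => none
      | some nseq => loopA keypad cl ci cj rest nseq

def get_seq (keypad : List String) (code : String) : List String :=
  match findP keypad 'A' with
  | none => []       -- Python: AssertionError (outside Pre_)
  | some (ci, cj) =>
    match loopA keypad code.toList ci cj (PySem.List.enumerate code.toList) [[]] with
    | none => []     -- Python: AssertionError (outside Pre_)
    | some seqs => seqs.map (fun l => String.ofList l)

-- ===== PORT B =====
-- B's pure `paths(i, j, ti, tj)` (no accumulator; prepends the move character);
-- same fuel-as-totality-guard, the algorithm is Source B's.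
def dfsBF (fuel : Nat) (ti tj i j : Int) : List (List Char) :=
  match fuel with
  | 0 => []
  | fuel + 1 =>
    if i = ti ∧ j = tj then [['A']]
    else
      (if tj < j then (dfsBF fuel ti tj i (j - 1)).map (fun p => '<' :: p)
       else if j < tj then (dfsBF fuel ti tj i (j + 1)).map (fun p => '>' :: p)
       else []) ++
      (if i < ti then (dfsBF fuel ti tj (i + 1) j).map (fun p => 'v' :: p)
       else if ti < i then (dfsBF fuel ti tj (i - 1) j).map (fun p => '^' :: p)
       else [])

def dfsB (ti tj i j : Int) : List (List Char) :=
  dfsBF (dfsFuel ti tj i j) ti tj i j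

-- B's `for c in code:` loop building `per_char` while threading `pos`; `none` = find raised.
def perChar (keypad : List String) : List Char → Int × Int → Option (List (List (List Char)))
  | [], _ => some []
  | c :: rest, pos =>
    match findP keypad c with
    | none => none
    | some nxt =>
      (perChar keypad rest nxt).map (fun ls => dfsB nxt.1 nxt.2 pos.1 pos.2 :: ls)

-- B's `res = [s + p for s in res for p in lst]`.
def combineStep (res : List (List Char)) (lst : List (List Char)) : List (List Char) :=
  res.flatMap (fun s => lst.map (fun p => s ++ p))

def get_seq_alt (keypad : List String) (code : String) : List String :=
  match findP keypad 'A' with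
  | none => []       -- Python: AssertionError (outside Pre_)
  | some pos =>
    match perChar keypad code.toList pos with
    | none => []     -- Python: AssertionError (outside Pre_)
    | some lists =>
      (lists.foldl combineStep [[]]).map (fun l => String.ofList l)

-- ===== PRECONDITION & SPEC =====
-- A raises AssertionError iff "A" or some character of code occurs in no keypad row;
-- Pre_ excludes exactly those inputs.
def Pre_get_seq (keypad : List String) (code : String) : Prop :=
  keypad.any (fun r => 'A' ∈ r.toList) = true ∧
    code.toList.all (fun c => keypad.any (fun r => c ∈ r.toList)) = true

instance (keypad : List String) (code : String) : Decidable (Pre_get_seq keypad code) := by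
  unfold Pre_get_seq; infer_instance

def pvWitness_get_seq : List String × String := (["789", "456", "123", " 0A"], "029A")

def Spec_get_seq (keypad : List String) (code : String) (out : List String) : Prop := out = get_seq_alt keypad code
instance (keypad : List String) (code : String) (out : List String) : Decidable (Spec_get_seq keypad code out) := by unfold Spec_get_seq; infer_instance

-- ===== CLAIM (what is proved, stated in full; the proofs are below) =====
def Claim_equal_get_seq : Prop := ∀ (keypad : List String) (code : String), Dom_get_seq keypad code → Pre_get_seq keypad code → Spec_get_seq keypad code (get_seq keypad code)

-- ===== LEMMAS AND PROOFS =====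

-- find succeeds exactly on characters some row contains
theorem findAux_isSome (rows : List String) (c : Char) (i : Int)
    (h : ∃ r ∈ rows, c ∈ r.toList) : (findAux rows c i).isSome := by
  induction rows generalizing i with
  | nil => simp at h
  | cons row rest ih =>
    rw [findAux]
    rcases h with ⟨r, hr, hc⟩
    rcases List.mem_cons.mp hr with hr | hr
    · subst hr; simp [hc]
    · split
      · simp
      · exact ih (i + 1) ⟨r, hr, hc⟩

theorem findP_isSome (keypad : List String) (c : Char)
    (h : ∃ r ∈ keypad, c ∈ r.toList) : (findP keypad c).isSome :=
  findAux_isSome keypad c 0 h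

-- the accumulator-carrying dfs is the pure dfs with the prefix mapped on
theorem dfsAF_eq_map_dfsBF (ti tj : Int) :
    ∀ (fuel : Nat) (i j : Int) (seq : List Char),
      dfsAF fuel ti tj i j seq = (dfsBF fuel ti tj i j).map (fun p => seq ++ p) := by
  intro fuel
  induction fuel with
  | zero => intro i j seq; simp [dfsAF, dfsBF]
  | succ n ih =>
    intro i j seq
    rw [dfsAF, dfsBF]
    by_cases htgt : i = ti ∧ j = tj
    · simp [htgt]
    · simp only [if_neg htgt]
      rw [List.map_append]
      congr 1
      · split_ifs with h1 h2
        · rw [ih i (j - 1), List.map_map]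
          simp [Function.comp_def, List.append_assoc]
        · rw [ih i (j + 1), List.map_map]
          simp [Function.comp_def, List.append_assoc]
        · simp
      · split_ifs with h1 h2
        · rw [ih (i + 1) j, List.map_map]
          simp [Function.comp_def, List.append_assoc]
        · rw [ih (i - 1) j, List.map_map]
          simp [Function.comp_def, List.append_assoc]
        · simp

theorem dfsA_eq_map_dfsB (ti tj i j : Int) (seq : List Char) :
    dfsA ti tj i j seq = (dfsB ti tj i j).map (fun p => seq ++ p) := by
  rw [dfsA, dfsB]
  exact dfsAF_eq_map_dfsBF ti tj _ i j seq

-- fold of an always-`some` bind over an option accumulator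
theorem foldl_bind_some {α β : Type} (l : List α) (g : List β → α → List β) :
    ∀ b : List β,
      l.foldl (fun acc x => acc.bind (fun a => some (g a x))) (some b) =
        some (l.foldl g b) := by
  induction l with
  | nil => intro b; simp
  | cons x xs ih => intro b; simpa using ih (g b x)

-- A's inner per-prefix loop, once the start position is fixed, is one combineStep
theorem innerA_eq_combineStep (keypad : List String) (cl : List Char) (ci cj ti tj : Int)
    (k : Int) (pos : Int × Int) (seqs : List (List Char))
    (hstart : (if k > 0 then (PySem.List.pyGet? cl (k - 1)).bind (fun c' => findP keypad c')
               else some (ci, cj)) = some pos) :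
    seqs.foldl (fun acc seq =>
        acc.bind (fun nseq =>
          (if k > 0 then (PySem.List.pyGet? cl (k - 1)).bind (fun c' => findP keypad c')
           else some (ci, cj)).map
            (fun st => nseq ++ dfsA ti tj st.1 st.2 seq))) (some []) =
      some (combineStep seqs (dfsB ti tj pos.1 pos.2)) := by
  have hd : ∀ seq, dfsA ti tj pos.1 pos.2 seq = (dfsB ti tj pos.1 pos.2).map (fun p => seq ++ p) :=
    fun seq => dfsA_eq_map_dfsB ti tj pos.1 pos.2 seq
  rw [hstart]
  simp only [Option.map_some]
  rw [foldl_bind_some seqs (fun nseq seq => nseq ++ dfsA ti tj pos.1 pos.2 seq) []]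
  congr 1
  rw [PySem.List.foldl_append_eq_flatMap]
  simp only [List.nil_append, combineStep]
  congr 1
  funext seq
  exact hd seq

-- main loop invariant: A's enumerate loop computes B's fold of the per-character lists
theorem loopA_eq (keypad : List String) (ci cj : Int) :
    ∀ (rest pre : List Char) (pos : Int × Int) (seqs : List (List Char)),
      (pre = [] → pos = (ci, cj)) →
      (∀ pre' c', pre = pre' ++ [c'] → findP keypad c' = some pos) →
      (∀ c ∈ rest, ∃ r ∈ keypad, c ∈ r.toList) →
      ∃ lists, perChar keypad rest pos = some lists ∧
        loopA keypad (pre ++ rest) ci cj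
          (PySem.List.enumerate rest (pre.length : Int)) seqs =
          some (lists.foldl combineStep seqs) := by
  intro rest
  induction rest with
  | nil =>
    intro pre pos seqs _ _ _
    exact ⟨[], rfl, by simp [loopA, PySem.List.enumerate_nil]⟩
  | cons c rest ih =>
    intro pre pos seqs hnil hlast hfind
    have hc : ∃ r ∈ keypad, c ∈ r.toList := hfind c (by simp)
    obtain ⟨⟨ti, tj⟩, htij⟩ := Option.isSome_iff_exists.mp (findP_isSome keypad c hc)
    have hstart : (if (pre.length : Int) > 0 then
        (PySem.List.pyGet? (pre ++ c :: rest) ((pre.length : Int) - 1)).bind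
          (fun c' => findP keypad c')
        else some (ci, cj)) = some pos := by
      cases pre with
      | nil => simpa using (hnil rfl).symm
      | cons p ps =>
        have hlen : (0 : Int) < ((p :: ps).length : Int) := by
          simp
        rw [if_pos hlen]
        obtain ⟨pre', c', hpre⟩ : ∃ pre' c', p :: ps = pre' ++ [c'] :=
          ⟨(p :: ps).dropLast, (p :: ps).getLast (by simp),
            (List.dropLast_concat_getLast (by simp)).symm⟩
        rw [hpre]
        have hidx : ((pre' ++ [c']).length : Int) - 1 = (pre'.length : Int) := by
          simp
        rw [hidx, List.append_assoc]
        rw [PySem.List.pyGet?_natCast]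
        simp only [List.getElem?_append_right (le_refl pre'.length), Nat.sub_self]
        exact hlast pre' c' hpre
    rw [PySem.List.enumerate_cons]
    obtain ⟨lists, hl1, hl2⟩ := ih (pre ++ [c]) (ti, tj) (combineStep seqs (dfsB ti tj pos.1 pos.2))
      (by simp)
      (by
        intro pre' c' h
        obtain ⟨h1, h2⟩ := List.append_inj' h rfl
        simp at h2
        rw [← h2]; exact htij)
      (fun c' hc' => hfind c' (by simp [hc']))
    refine ⟨dfsB ti tj pos.1 pos.2 :: lists, by simp [perChar, htij, hl1], ?_⟩
    simp only [loopA, htij]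
    rw [innerA_eq_combineStep keypad (pre ++ c :: rest) ci cj ti tj
      (pre.length : Int) pos seqs hstart]
    have harr : pre ++ c :: rest = (pre ++ [c]) ++ rest := by simp
    have hlen2 : ((pre ++ [c]).length : Int) = (pre.length : Int) + 1 := by simp
    show loopA keypad (pre ++ c :: rest) ci cj
        (PySem.List.enumerate rest ((pre.length : Int) + 1))
        (combineStep seqs (dfsB ti tj pos.1 pos.2)) =
      some (List.foldl combineStep seqs (dfsB ti tj pos.1 pos.2 :: lists))
    rw [List.foldl_cons, harr, ← hlen2]
    exact hl2

-- ===== VERDICT (by name: the statement is the Claim_ definition above) =====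
theorem get_seq_spec : Claim_equal_get_seq := by
  intro keypad code _ hpre
  unfold Spec_get_seq get_seq get_seq_alt
  have hA : ∃ r ∈ keypad, 'A' ∈ r.toList := by simpa using hpre.1
  have hcode : ∀ c ∈ code.toList, ∃ r ∈ keypad, c ∈ r.toList := by simpa using hpre.2
  obtain ⟨⟨ci, cj⟩, hfA⟩ := Option.isSome_iff_exists.mp (findP_isSome keypad 'A' hA)
  obtain ⟨lists, hl1, hl2⟩ := loopA_eq keypad ci cj code.toList [] (ci, cj) [[]]
    (fun _ => rfl) (by intro pre' c' h; simp at h) hcode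
  simp only [List.nil_append, List.length_nil, Nat.cast_zero] at hl2
  simp only [hfA, hl1, hl2]
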